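-- pv_equiv track=rewrite | github.com/shaoLian-LH/astrbot_plugin_article_summary | service/article_summary_service.py | _is_publish_host_denylisted
-- ===== SOURCE A (Python) =====
-- PUBLISH_URL_PUBLIC_HOST_DENYLIST = (
--     "github.com",
--     "githubusercontent.com",
--     "gitlab.com",
--     "gitee.com",
--     "bitbucket.org",
-- )
--
-- def _is_publish_host_denylisted(host: str) -> bool:
--     normalized = str(host or "").strip().lower().strip(".")
--     if not normalized:
--         return False
--     for blocked in PUBLISH_URL_PUBLIC_HOST_DENYLIST:
--         if normalized == blocked or normalized.endswith(f".{blocked}"):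
--             return True
--     return False
-- ===== SOURCE B (Python) =====
-- PUBLISH_URL_PUBLIC_HOST_DENYLIST = (
--     "github.com",
--     "githubusercontent.com",
--     "gitlab.com",
--     "gitee.com",
--     "bitbucket.org",
-- )
--
-- _PUBLISH_HOST_DENYSET = frozenset(PUBLISH_URL_PUBLIC_HOST_DENYLIST)
--
--
-- def _is_publish_host_denylisted(host: str) -> bool:
--     normalized = str(host or "").strip().lower().strip(".")
--     if not normalized:
--         return False
--     if normalized in _PUBLISH_HOST_DENYSET:
--         return True
--     for i, ch in enumerate(normalized):
--         if ch == "." and normalized[i + 1:] in _PUBLISH_HOST_DENYSET: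
--             return True
--     return False
-- ===== Notes on version B (the rewrite author's own statement) =====
-- stated objective: idiomatic
-- what changed: B inverts the loop: instead of scanning the denylist tuple and testing the host with endswith for each entry, it builds a frozenset of the denylist once and walks the host's dot boundaries, testing each dot-suffix for set membership.
import Mathlib
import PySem

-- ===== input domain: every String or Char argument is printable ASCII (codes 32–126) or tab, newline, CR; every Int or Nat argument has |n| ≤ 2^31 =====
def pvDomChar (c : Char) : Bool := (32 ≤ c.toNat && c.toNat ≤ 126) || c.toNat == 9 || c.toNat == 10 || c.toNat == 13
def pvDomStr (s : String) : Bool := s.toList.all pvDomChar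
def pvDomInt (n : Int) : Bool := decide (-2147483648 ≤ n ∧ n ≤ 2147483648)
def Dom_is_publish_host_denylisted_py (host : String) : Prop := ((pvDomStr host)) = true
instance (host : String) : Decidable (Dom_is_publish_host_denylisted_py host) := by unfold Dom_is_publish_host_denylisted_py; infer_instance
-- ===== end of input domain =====

-- B replaces A's scan of the denylist tuple with endswith by a walk over the host's
-- dot boundaries testing each dot-suffix for membership in a set of the denylist (idiomatic).

-- ===== PORT A =====
-- the module constant PUBLISH_URL_PUBLIC_HOST_DENYLIST, on code points
def pvDenylistChars : List (List Char) :=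
  ["github.com".toList, "githubusercontent.com".toList, "gitlab.com".toList,
   "gitee.com".toList, "bitbucket.org".toList]

-- normalized = str(host or "").strip().lower().strip(".")  ('host or ""' is the string itself:
-- a falsy str is "" — so it is the identity here); shared verbatim by A and B, ported once
def pvNormalize (host : String) : List Char :=
  PySem.Chars.stripChars (PySem.Chars.lower (PySem.Chars.strip host.toList)) ['.']

-- the for-loop over the tuple: return True on '==' or '.endswith("." + blocked)', else fall through
def pvLoopA (normalized : List Char) : List (List Char) → Bool
  | [] => false
  | blocked :: rest =>
    if normalized == blocked || PySem.Chars.endswith normalized ('.' :: blocked) then true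
    else pvLoopA normalized rest

def is_publish_host_denylisted_py (host : String) : Bool :=
  let normalized := pvNormalize host
  if normalized.isEmpty then false
  else pvLoopA normalized pvDenylistChars

-- ===== PORT B =====
-- _PUBLISH_HOST_DENYSET = frozenset(PUBLISH_URL_PUBLIC_HOST_DENYLIST)
def pvDenySet : PySem.Set (List Char) := PySem.Set.ofList pvDenylistChars

def is_publish_host_denylisted_py_alt (host : String) : Bool :=
  let normalized := pvNormalize host
  if normalized.isEmpty then false
  else if PySem.Set.contains pvDenySet normalized then true
  else (PySem.List.enumerate normalized).any (fun p =>
    p.2 == '.' && PySem.Set.contains pvDenySet (PySem.List.slice normalized (some (p.1 + 1)) none))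

-- ===== PRECONDITION & SPEC =====
def Spec_is_publish_host_denylisted_py (host : String) (out : Bool) : Prop := out = is_publish_host_denylisted_py_alt host
instance (host : String) (out : Bool) : Decidable (Spec_is_publish_host_denylisted_py host out) := by unfold Spec_is_publish_host_denylisted_py; infer_instance

-- ===== CLAIM (what is proved, stated in full; the proofs are below) =====
def Claim_equal_is_publish_host_denylisted_py : Prop := ∀ (host : String), Dom_is_publish_host_denylisted_py host → Spec_is_publish_host_denylisted_py host (is_publish_host_denylisted_py host)

-- ===== LEMMAS AND PROOFS =====

-- A's loop is an 'any' over the denylist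
theorem pvLoopA_eq_any (l : List (List Char)) (n : List Char) :
    pvLoopA n l = l.any (fun b => n == b || PySem.Chars.endswith n ('.' :: b)) := by
  induction l with
  | nil => rfl
  | cons b rest ih =>
    simp only [pvLoopA, List.any_cons]
    split <;> simp_all

-- a dot-prefixed suffix of n is exactly a suffix starting right after a '.' of n
theorem pvDotSuffix_iff (n b : List Char) :
    ('.' :: b) <:+ n ↔ ∃ (k : Nat), ∃ _ : k < n.length, n[k] = '.' ∧ n.drop (k + 1) = b := by
  constructor
  · rintro ⟨t, rfl⟩
    refine ⟨t.length, by simp, ?_, ?_⟩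
    · simp
    · simp
  · rintro ⟨k, h, hc, hd⟩
    refine ⟨n.take k, ?_⟩
    calc n.take k ++ '.' :: b = n.take k ++ n.drop k := by
          rw [List.drop_eq_getElem_cons h, hc, hd]
      _ = n := List.take_append_drop k n

-- the crux: A's denylist scan equals B's dot-suffix walk, on any normalized string
theorem pvCore (n : List Char) :
    pvLoopA n pvDenylistChars =
      (PySem.Set.contains pvDenySet n ||
       (PySem.List.enumerate n).any (fun p =>
         p.2 == '.' && PySem.Set.contains pvDenySet (PySem.List.slice n (some (p.1 + 1)) none))) := by
  rw [Bool.eq_iff_iff]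
  rw [pvLoopA_eq_any]
  simp only [List.any_eq_true, Bool.or_eq_true, Bool.and_eq_true, beq_iff_eq,
    PySem.Chars.endswith_iff, PySem.Set.contains_iff, pvDenySet, PySem.Set.mem_ofList,
    PySem.List.mem_enumerate_iff]
  constructor
  · rintro ⟨b, hb, hcase⟩
    rcases hcase with rfl | hsuf
    · exact Or.inl hb
    · rcases (pvDotSuffix_iff n b).mp hsuf with ⟨k, hk, hc, hd⟩
      refine Or.inr ⟨(0 + (k : Int), n[k]), ⟨k, hk, rfl⟩, hc, ?_⟩
      rw [show (0 + (k : Int)) + 1 = ((k + 1 : Nat) : Int) by push_cast; ring]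
      rw [PySem.List.slice_from_natCast, hd]
      exact hb
  · rintro (hn | ⟨p, ⟨k, hk, rfl⟩, hc, hs⟩)
    · exact ⟨n, hn, Or.inl rfl⟩
    · rw [show (0 + (k : Int)) + 1 = ((k + 1 : Nat) : Int) by push_cast; ring,
        PySem.List.slice_from_natCast] at hs
      exact ⟨n.drop (k + 1), hs, Or.inr ((pvDotSuffix_iff n _).mpr ⟨k, hk, hc, rfl⟩)⟩

-- ===== VERDICT (by name: the statement is the Claim_ definition above) =====
theorem is_publish_host_denylisted_py_spec : Claim_equal_is_publish_host_denylisted_py := by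
  intro host _
  unfold Spec_is_publish_host_denylisted_py is_publish_host_denylisted_py is_publish_host_denylisted_py_alt
  by_cases h : (pvNormalize host).isEmpty <;> simp [h, pvCore]
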